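-- pv_equiv track=rewrite | github.com/Towqs/astrbot_plugin_fitness | periodization.py | _generate_intensity_progression
-- ===== SOURCE A (Python) =====
-- def _generate_intensity_progression(weeks: int, deload_week: int) -> list[str]:
--     """生成渐进超负荷的强度序列
--
--     例如 4 周: normal → normal → high → low(deload)
--     例如 6 周: normal → normal → high → high → high → low(deload)
--     例如 8 周: normal → normal → normal → high → high → high → high → low(deload)
--     """
--     intensities = []
--     # 非去负荷周的数量
--     training_weeks = weeks - (1 if deload_week > 0 else 0)
--     # 前 1/3 为 normal，后面为 high
--     normal_count = max(training_weeks // 3, 1)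
--
--     for w in range(1, weeks + 1):
--         if w == deload_week:
--             intensities.append("low")
--         elif w <= normal_count:
--             intensities.append("normal")
--         else:
--             intensities.append("high")
--     return intensities
-- ===== SOURCE B (Python) =====
-- def _generate_intensity_progression(weeks: int, deload_week: int) -> list[str]:
--     training_weeks = weeks - (1 if deload_week > 0 else 0)
--     normal_count = max(training_weeks // 3, 1)
--     n = max(weeks, 0)
--     a = min(normal_count, n)  # length of the normal block
--     if 1 <= deload_week <= weeks:
--         i = deload_week - 1
--         if i < a:
--             runs = [(i, "normal"), (1, "low"), (a - i - 1, "normal"), (n - a, "high")]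
--         else:
--             runs = [(a, "normal"), (i - a, "high"), (1, "low"), (n - i - 1, "high")]
--     else:
--         runs = [(a, "normal"), (n - a, "high")]
--     out = []
--     for count, label in runs:
--         out.extend([label] * count)
--     return out
-- ===== Notes on version B (the rewrite author's own statement) =====
-- stated objective: alternative
-- what changed: Replaces A's per-week loop with three branches by a run-length construction: compute the segment layout once (the deload slot splitting whichever block it falls in) and expand the runs, with no per-element test and no overwrite.
import Mathlib
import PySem

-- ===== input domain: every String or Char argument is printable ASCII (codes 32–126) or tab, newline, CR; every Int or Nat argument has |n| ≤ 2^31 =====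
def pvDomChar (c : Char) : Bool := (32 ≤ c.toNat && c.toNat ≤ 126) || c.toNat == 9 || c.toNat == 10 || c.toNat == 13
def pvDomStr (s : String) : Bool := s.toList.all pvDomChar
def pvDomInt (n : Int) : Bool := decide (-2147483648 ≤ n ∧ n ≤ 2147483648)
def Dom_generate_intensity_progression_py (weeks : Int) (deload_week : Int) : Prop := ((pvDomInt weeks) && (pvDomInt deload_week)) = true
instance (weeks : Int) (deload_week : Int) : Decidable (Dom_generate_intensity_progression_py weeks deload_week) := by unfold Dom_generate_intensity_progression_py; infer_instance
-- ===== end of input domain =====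

-- B replaces A's per-week branching loop by a run-length construction: it computes the
-- segment layout (the deload slot splitting whichever block it falls in) and expands the
-- runs; objective: alternative decomposition, same cost.

-- ===== PORT A =====
def generate_intensity_progression_py (weeks : Int) (deload_week : Int) : List String :=
  let training_weeks := weeks - (if deload_week > 0 then 1 else 0)
  let normal_count := max (PySem.Int.floordiv training_weeks 3) 1
  (PySem.List.pyRange 1 (weeks + 1) 1).foldl
    (fun intensities w =>
      if w = deload_week then intensities ++ ["low"]
      else if w ≤ normal_count then intensities ++ ["normal"]
      else intensities ++ ["high"]) []

-- ===== PORT B =====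
def generate_intensity_progression_py_alt (weeks : Int) (deload_week : Int) : List String :=
  let training_weeks := weeks - (if deload_week > 0 then 1 else 0)
  let normal_count := max (PySem.Int.floordiv training_weeks 3) 1
  let n := max weeks 0
  let a := min normal_count n
  let runs : List (Int × String) :=
    if 1 ≤ deload_week ∧ deload_week ≤ weeks then
      let i := deload_week - 1
      if i < a then [(i, "normal"), (1, "low"), (a - i - 1, "normal"), (n - a, "high")]
      else [(a, "normal"), (i - a, "high"), (1, "low"), (n - i - 1, "high")]
    else [(a, "normal"), (n - a, "high")]
  runs.foldl (fun out p => out ++ List.replicate p.1.toNat p.2) []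

-- ===== PRECONDITION & SPEC =====
def Spec_generate_intensity_progression_py (weeks : Int) (deload_week : Int) (out : List String) : Prop := out = generate_intensity_progression_py_alt weeks deload_week
instance (weeks : Int) (deload_week : Int) (out : List String) : Decidable (Spec_generate_intensity_progression_py weeks deload_week out) := by unfold Spec_generate_intensity_progression_py; infer_instance

-- ===== CLAIM (what is proved, stated in full; the proofs are below) =====
def Claim_equal_generate_intensity_progression_py : Prop := ∀ (weeks : Int) (deload_week : Int), Dom_generate_intensity_progression_py weeks deload_week → Spec_generate_intensity_progression_py weeks deload_week (generate_intensity_progression_py weeks deload_week)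

-- ===== LEMMAS AND PROOFS =====

-- k-th element of four concatenated replicate blocks.
theorem getElem_rep4 (c1 c2 c3 c4 : ℕ) (s1 s2 s3 s4 : String) (k : ℕ)
    (hk : k < (List.replicate c1 s1 ++ (List.replicate c2 s2 ++ (List.replicate c3 s3 ++ List.replicate c4 s4))).length) :
    (List.replicate c1 s1 ++ (List.replicate c2 s2 ++ (List.replicate c3 s3 ++ List.replicate c4 s4)))[k]'hk
    = if k < c1 then s1 else if k < c1 + c2 then s2 else if k < c1 + c2 + c3 then s3 else s4 := by
  simp only [List.getElem_append, List.getElem_replicate, List.length_replicate]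
  split_ifs <;> first | rfl | omega

-- k-th element of two concatenated replicate blocks.
theorem getElem_rep2 (c1 c2 : ℕ) (s1 s2 : String) (k : ℕ)
    (hk : k < (List.replicate c1 s1 ++ List.replicate c2 s2).length) :
    (List.replicate c1 s1 ++ List.replicate c2 s2)[k]'hk
    = if k < c1 then s1 else s2 := by
  simp only [List.getElem_append, List.getElem_replicate, List.length_replicate]
  split_ifs <;> rfl

-- Core equality, for an arbitrary cutoff nc ≥ 1 in place of normal_count:
-- A's branching loop over range(1, weeks+1) equals B's run-length expansion.
theorem runs_eq (weeks d nc : Int) (h1 : 1 ≤ nc) :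
    (PySem.List.pyRange 1 (weeks + 1) 1).foldl
      (fun acc w => if w = d then acc ++ ["low"]
        else if w ≤ nc then acc ++ ["normal"] else acc ++ ["high"]) []
    = (if 1 ≤ d ∧ d ≤ weeks then
        if d - 1 < min nc (max weeks 0) then
          [(d - 1, "normal"), ((1 : Int), "low"),
           (min nc (max weeks 0) - (d - 1) - 1, "normal"), (max weeks 0 - min nc (max weeks 0), "high")]
        else
          [(min nc (max weeks 0), "normal"), (d - 1 - min nc (max weeks 0), "high"),
           ((1 : Int), "low"), (max weeks 0 - (d - 1) - 1, "high")]
      else [(min nc (max weeks 0), "normal"), (max weeks 0 - min nc (max weeks 0), "high")]).foldl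
        (fun out p => out ++ List.replicate p.1.toNat p.2) [] := by
  have hfun : (fun (acc : List String) (w : Int) => if w = d then acc ++ ["low"]
        else if w ≤ nc then acc ++ ["normal"] else acc ++ ["high"])
      = fun acc w => acc ++ [if w = d then "low" else if w ≤ nc then "normal" else "high"] := by
    funext acc w; split_ifs <;> rfl
  rw [hfun, PySem.List.foldl_append_singleton_eq_map, List.nil_append, PySem.List.pyRange_one]
  set a := min nc (max weeks 0) with ha
  by_cases hg : 1 ≤ d ∧ d ≤ weeks
  · rw [if_pos hg]
    by_cases hi : d - 1 < a
    · rw [if_pos hi]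
      simp only [List.foldl_cons, List.foldl_nil, List.nil_append, List.append_assoc]
      apply List.ext_getElem
      · simp only [List.length_map, List.length_range, List.length_append, List.length_replicate]
        omega
      · intro k hk hk2
        simp only [List.length_map, List.length_range] at hk
        simp only [List.getElem_map, List.getElem_range]
        rw [getElem_rep4]
        split_ifs <;> first | rfl | omega
    · rw [if_neg hi]
      simp only [List.foldl_cons, List.foldl_nil, List.nil_append, List.append_assoc]
      apply List.ext_getElem
      · simp only [List.length_map, List.length_range, List.length_append, List.length_replicate]
        omega
      · intro k hk hk2
        simp only [List.length_map, List.length_range] at hk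
        simp only [List.getElem_map, List.getElem_range]
        rw [getElem_rep4]
        split_ifs <;> first | rfl | omega
  · rw [if_neg hg]
    simp only [List.foldl_cons, List.foldl_nil, List.nil_append]
    apply List.ext_getElem
    · simp only [List.length_map, List.length_range, List.length_append, List.length_replicate]
      omega
    · intro k hk hk2
      simp only [List.length_map, List.length_range] at hk
      simp only [List.getElem_map, List.getElem_range]
      rw [getElem_rep2]
      split_ifs <;> first | rfl | omega

-- ===== VERDICT (by name: the statement is the Claim_ definition above) =====
theorem generate_intensity_progression_py_spec : Claim_equal_generate_intensity_progression_py := by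
  intro weeks deload_week _
  exact runs_eq weeks deload_week _ (le_max_right _ _)
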